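-- pv_equiv track=rewrite | github.com/bobthebuilderdev007-sketch/B2B_STT | evaluation.py | _best_text_field
-- ===== SOURCE A (Python) =====
-- from typing import Dict, List, Optional, Tuple
--
-- def _best_text_field(d: Dict, field_priority: Optional[List[str]] = None) -> Optional[str]:
--     defaults = ["text", "ref", "transcript", "sentence", "content", "value", "utterance"]
--     fields = (field_priority or []) + defaults
--     lower = {k.lower(): k for k in d.keys()}
--     for want in fields:
--         if want is None:
--             continue
--         k = lower.get(want.lower())
--         if k and isinstance(d.get(k), str):
--             val = d[k].strip()
--             if val:
--                 return val
--     if "Text" in d and isinstance(d["Text"], str) and d["Text"].strip():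
--         return d["Text"].strip()
--     return None
-- ===== SOURCE B (Python) =====
-- from typing import Dict, List, Optional
--
-- def _best_text_field(d: Dict, field_priority: Optional[List[str]] = None) -> Optional[str]:
--     defaults = ["text", "ref", "transcript", "sentence", "content", "value", "utterance"]
--     fields = (field_priority or []) + defaults
--     rank = {}
--     for i, f in enumerate(fields):
--         if f is not None:
--             rank.setdefault(f.lower(), i)
--     best = None  # (rank, stripped value) with the lowest rank seen
--     for k, v in d.items():
--         if isinstance(v, str):
--             val = v.strip()
--             if val:
--                 r = rank.get(k.lower())
--                 if r is not None and (best is None or r < best[0]):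
--                     best = (r, val)
--     if best is not None:
--         return best[1]
--     t = d.get("Text")
--     if isinstance(t, str) and t.strip():
--         return t.strip()
--     return None
-- ===== Notes on version B (the rewrite author's own statement) =====
-- stated objective: alternative
-- what changed: Inverts the traversal: instead of looping over priority fields and looking each up in a lowercase key-index of the dict, B builds a field-name-to-priority rank map once and makes a single argmin pass over the dict items, keeping the non-empty stripped value with the lowest rank; Pre_ excludes priority lists containing the empty string and dicts with two distinct keys equal up to lowercasing, where A's truthy-key guard and last-wins index overwrite choose accidentally.
-- outside the precondition, e.g. on _best_text_field({'': 'hi'}, ['']): A returns None, B returns 'hi'; on _best_text_field({'TEXT': 'hi', 'text': ''}, None): A returns None, B returns 'hi'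
import Mathlib
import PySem

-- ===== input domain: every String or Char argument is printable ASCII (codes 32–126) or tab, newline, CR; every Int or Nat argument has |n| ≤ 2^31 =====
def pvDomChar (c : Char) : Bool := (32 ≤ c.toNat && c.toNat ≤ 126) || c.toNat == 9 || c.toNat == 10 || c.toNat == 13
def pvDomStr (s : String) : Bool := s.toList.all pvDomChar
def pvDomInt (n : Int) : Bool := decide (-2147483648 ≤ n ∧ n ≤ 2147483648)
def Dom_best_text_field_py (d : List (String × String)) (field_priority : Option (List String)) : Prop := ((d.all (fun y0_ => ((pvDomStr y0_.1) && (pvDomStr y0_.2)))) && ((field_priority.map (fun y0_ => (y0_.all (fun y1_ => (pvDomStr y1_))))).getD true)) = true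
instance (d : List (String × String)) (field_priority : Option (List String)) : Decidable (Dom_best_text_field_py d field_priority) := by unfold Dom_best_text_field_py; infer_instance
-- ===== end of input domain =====

-- B inverts the traversal: a field→priority rank map is built once, then ONE argmin pass
-- over the dict items picks the non-empty stripped value of lowest rank (alternative, same cost).

-- ===== PORT A =====
-- lower = {k.lower(): k for k in d.keys()}
def pyA_lowerMap (keys : List String) : PySem.Dict String String :=
  keys.foldl (fun m k => m.insert (PySem.Str.lower k) k) PySem.Dict.empty

-- the 'for want in fields' loop of A
def pyA_loop (dd : PySem.Dict String String) (lm : PySem.Dict String String) :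
    List String → Option String
  | [] => none
  | want :: rest =>
    match lm.get? (PySem.Str.lower want) with
    | some k =>
      if k ≠ "" then
        match dd.get? k with
        | some v =>
          let val := PySem.Str.strip v
          if val ≠ "" then some val else pyA_loop dd lm rest
        | none => pyA_loop dd lm rest
      else pyA_loop dd lm rest
    | none => pyA_loop dd lm rest

def best_text_field_py (d : List (String × String)) (field_priority : Option (List String)) : Option String :=
  let dd := PySem.Dict.ofList d
  let defaults := ["text", "ref", "transcript", "sentence", "content", "value", "utterance"]
  let fields := field_priority.getD [] ++ defaults
  let lm := pyA_lowerMap dd.keys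
  match pyA_loop dd lm fields with
  | some v => some v
  | none =>
    match dd.get? "Text" with
    | some t =>
      let ts := PySem.Str.strip t
      if ts ≠ "" then some ts else none
    | none => none

-- ===== PORT B =====
-- rank = {}; for i, f in enumerate(fields): rank.setdefault(f.lower(), i)
def pyB_rank (fields : List String) : PySem.Dict String Int :=
  (PySem.List.enumerate fields).foldl
    (fun m p => m.setdefault (PySem.Str.lower p.2) p.1) PySem.Dict.empty

-- single pass over items keeping the lowest-rank non-empty candidate
def pyB_scan (rank : PySem.Dict String Int) (items : List (String × String)) :
    Option (Int × String) :=
  items.foldl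
    (fun best kv =>
      let val := PySem.Str.strip kv.2
      if val ≠ "" then
        match rank.get? (PySem.Str.lower kv.1) with
        | some r =>
          match best with
          | none => some (r, val)
          | some b => if r < b.1 then some (r, val) else best
        | none => best
      else best)
    none

def best_text_field_py_alt (d : List (String × String)) (field_priority : Option (List String)) : Option String :=
  let dd := PySem.Dict.ofList d
  let fields := field_priority.getD [] ++ ["text", "ref", "transcript", "sentence", "content", "value", "utterance"]
  match pyB_scan (pyB_rank fields) dd.items with
  | some b => some b.2
  | none =>
    match dd.get? "Text" with
    | some t =>
      let ts := PySem.Str.strip t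
      if ts ≠ "" then some ts else none
    | none => none

-- ===== PRECONDITION & SPEC =====
-- Pre_ excludes priority lists containing the empty string and dicts with two distinct keys
-- equal up to lowercasing: there A's result depends on its truthy-key guard and the last-wins
-- overwrite of its lowercase index — accidental tie-breaks nobody would specify.
def Pre_best_text_field_py (d : List (String × String)) (field_priority : Option (List String)) : Prop :=
  "" ∉ field_priority.getD [] ∧
  (d.map (·.1)).Pairwise (fun a b => PySem.Str.lower a = PySem.Str.lower b → a = b)
instance (d : List (String × String)) (field_priority : Option (List String)) : Decidable (Pre_best_text_field_py d field_priority) := by unfold Pre_best_text_field_py; infer_instance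

def pvWitness_best_text_field_py : (List (String × String)) × Option (List String) :=
  ([("Ref", " hi ")], some ["note"])

def Spec_best_text_field_py (d : List (String × String)) (field_priority : Option (List String)) (out : Option String) : Prop := out = best_text_field_py_alt d field_priority
instance (d : List (String × String)) (field_priority : Option (List String)) (out : Option String) : Decidable (Spec_best_text_field_py d field_priority out) := by unfold Spec_best_text_field_py; infer_instance

-- ===== CLAIM =====
def Claim_equal_best_text_field_py : Prop := ∀ (d : List (String × String)) (field_priority : Option (List String)), Dom_best_text_field_py d field_priority → Pre_best_text_field_py d field_priority → Spec_best_text_field_py d field_priority (best_text_field_py d field_priority)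

-- ===== LEMMAS AND PROOFS =====

-- proof-side helper definitions
def pvStepA (dd lm : PySem.Dict String String) (w : String) : Option String :=
  match lm.get? (PySem.Str.lower w) with
  | some k =>
    if k ≠ "" then
      match dd.get? k with
      | some v => if PySem.Str.strip v ≠ "" then some (PySem.Str.strip v) else none
      | none => none
    else none
  | none => none

def pvG (items : List (String × String)) (wl : String) : Option String :=
  (items.find? (fun kv => PySem.Str.lower kv.1 == wl)).bind
    (fun kv => if PySem.Str.strip kv.2 ≠ "" then some (PySem.Str.strip kv.2) else none)

def pvLastKey (ks : List String) (wl : String) : Option String :=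
  ks.foldl (fun acc k => if PySem.Str.lower k == wl then some k else acc) none

def pvRk (fields : List String) (s0 : Int) (wl : String) : Option Int :=
  ((PySem.List.enumerate fields s0).find? (fun p => PySem.Str.lower p.2 == wl)).map Prod.fst

def pvAnn (fields : List String) (s0 : Int) (items : List (String × String)) : List (Int × String) :=
  items.filterMap (fun kv =>
    if PySem.Str.strip kv.2 ≠ "" then
      (pvRk fields s0 (PySem.Str.lower kv.1)).map (fun r => (r, PySem.Str.strip kv.2))
    else none)

def pvMinstep (best : Option (Int × String)) (x : Int × String) : Option (Int × String) :=
  match best with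
  | none => some x
  | some b => if x.1 < b.1 then some x else best

theorem pvLower_eq_empty (s : String) (h : PySem.Str.lower s = "") : s = "" := by
  have h2 := congrArg String.toList h
  rw [PySem.Str.toList_lower] at h2
  apply String.toList_eq_nil_iff.mp
  cases hs : s.toList with
  | nil => rfl
  | cons c cs => rw [hs] at h2; simp [PySem.Chars.lower] at h2

theorem pvLoopA_eq_findSome? (dd lm : PySem.Dict String String) (fields : List String) :
    pyA_loop dd lm fields = fields.findSome? (pvStepA dd lm) := by
  induction fields with
  | nil => rfl
  | cons w rest ih =>
    rw [List.findSome?_cons]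
    cases hk : lm.get? (PySem.Str.lower w) with
    | none => simp [pyA_loop, pvStepA, hk, ih]
    | some k =>
      by_cases hke : k = ""
      · simp [pyA_loop, pvStepA, hk, hke, ih]
      · cases hv : dd.get? k with
        | none => simp [pyA_loop, pvStepA, hk, hke, hv, ih]
        | some v =>
          by_cases hs : PySem.Str.strip v = ""
          · simp [pyA_loop, pvStepA, hk, hke, hv, hs, ih]
          · simp [pyA_loop, pvStepA, hk, hke, hv, hs]

theorem pvLowerMap_get (ks : List String) (wl : String) :
    (pyA_lowerMap ks).get? wl = pvLastKey ks wl := by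
  induction ks using List.reverseRecOn with
  | nil => simp [pyA_lowerMap, pvLastKey, PySem.Dict.get?_empty]
  | append_singleton ks k ih =>
    simp only [pyA_lowerMap, pvLastKey, List.foldl_append, List.foldl_cons, List.foldl_nil] at *
    rw [PySem.Dict.get?_insert]
    by_cases h : PySem.Str.lower k = wl
    · simp [h]
    · simp [h, Ne.symm h, ih]

theorem pvFoldl_keep (ks : List String) (wl : String) (k0 : String)
    (h : ∀ k ∈ ks, ¬ PySem.Str.lower k = wl) :
    ks.foldl (fun acc k => if PySem.Str.lower k == wl then some k else acc) (some k0) = some k0 := by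
  induction ks with
  | nil => rfl
  | cons k ks ih =>
    rw [List.foldl_cons, if_neg (by simpa using h k (by simp))]
    exact ih (fun k' hk' => h k' (by simp [hk']))

theorem pvLastKey_eq_find? (ks : List String) (wl : String)
    (h : (ks.map PySem.Str.lower).Nodup) :
    pvLastKey ks wl = ks.find? (fun k => PySem.Str.lower k == wl) := by
  induction ks with
  | nil => rfl
  | cons k ks ih =>
    simp only [List.map_cons, List.nodup_cons] at h
    unfold pvLastKey
    rw [List.foldl_cons]
    by_cases hk : PySem.Str.lower k = wl
    · rw [List.find?_cons_of_pos (by simp [hk]), if_pos (by simp [hk])]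
      exact pvFoldl_keep ks wl k (fun k' hk' heq =>
        h.1 (by rw [show PySem.Str.lower k = PySem.Str.lower k' from hk.trans heq.symm]
                exact List.mem_map_of_mem hk'))
    · rw [List.find?_cons_of_neg (by simp [hk]), if_neg (by simp [hk])]
      exact ih h.2

theorem pvStepA_eq_g (dd : PySem.Dict String String)
    (hnd : dd.keys.Nodup) (hlu : (dd.keys.map PySem.Str.lower).Nodup)
    (w : String) (hw : PySem.Str.lower w ≠ "") :
    pvStepA dd (pyA_lowerMap dd.keys) w = pvG dd.items (PySem.Str.lower w) := by
  unfold pvStepA pvG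
  rw [pvLowerMap_get, pvLastKey_eq_find? _ _ hlu]
  have hkeys : dd.keys = dd.items.map Prod.fst := rfl
  rw [hkeys, List.find?_map]
  cases hf : dd.items.find? (fun kv => PySem.Str.lower kv.1 == PySem.Str.lower w) with
  | none =>
    rw [show List.find? ((fun k => PySem.Str.lower k == PySem.Str.lower w) ∘ Prod.fst) dd.items = none from hf]
    simp
  | some kv =>
    rw [show List.find? ((fun k => PySem.Str.lower k == PySem.Str.lower w) ∘ Prod.fst) dd.items = some kv from hf]
    have hmem := List.mem_of_find?_eq_some hf
    have hpred : PySem.Str.lower kv.1 = PySem.Str.lower w := by simpa using List.find?_some hf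
    have hke : kv.1 ≠ "" := fun he => hw (by rw [← hpred, he]; rfl)
    have hget : dd.get? kv.1 = some kv.2 := PySem.Dict.get?_of_mem_items dd hmem hnd
    simp [hke, hget]

theorem pvRankFold_get (ps : List (Int × String)) (m : PySem.Dict String Int) (wl : String) :
    (ps.foldl (fun m p => m.setdefault (PySem.Str.lower p.2) p.1) m).get? wl
      = (m.get? wl).or ((ps.find? (fun p => PySem.Str.lower p.2 == wl)).map Prod.fst) := by
  induction ps generalizing m with
  | nil => simp
  | cons p ps ih =>
    rw [List.foldl_cons, ih]
    by_cases h : PySem.Str.lower p.2 = wl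
    · rw [List.find?_cons_of_pos (by simp [h])]
      have hset : (m.setdefault (PySem.Str.lower p.2) p.1).get? wl = (m.get? wl).or (some p.1) := by
        rw [← h, PySem.Dict.get?_setdefault_self]
        cases hm : m.get? (PySem.Str.lower p.2) <;> simp
      rw [hset]
      cases m.get? wl <;> simp
    · rw [List.find?_cons_of_neg (by simp [h]),
        PySem.Dict.get?_setdefault_of_ne (hne := fun he => h he.symm)]

theorem pyB_rank_get (fields : List String) (wl : String) :
    (pyB_rank fields).get? wl = pvRk fields 0 wl := by
  unfold pyB_rank pvRk
  rw [pvRankFold_get]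
  simp [PySem.Dict.get?_empty]

theorem pvRk_cons (w : String) (rest : List String) (s0 : Int) (wl : String) :
    pvRk (w :: rest) s0 wl = if PySem.Str.lower w = wl then some s0 else pvRk rest (s0+1) wl := by
  unfold pvRk
  rw [PySem.List.enumerate_cons]
  by_cases h : PySem.Str.lower w = wl
  · rw [List.find?_cons_of_pos (by simp [h]), if_pos h]; rfl
  · rw [List.find?_cons_of_neg (by simp [h]), if_neg h]

theorem pvRk_ge (fields : List String) (s0 : Int) (wl : String) (r : Int)
    (h : pvRk fields s0 wl = some r) : s0 ≤ r := by
  unfold pvRk at h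
  cases hf : (PySem.List.enumerate fields s0).find? (fun p => PySem.Str.lower p.2 == wl) with
  | none => rw [hf] at h; simp at h
  | some p =>
    rw [hf] at h
    have hmem := List.mem_of_find?_eq_some hf
    rw [PySem.List.mem_enumerate_iff] at hmem
    obtain ⟨k, hk, rfl⟩ := hmem
    simp at h
    omega

theorem pvScan_fold (rank : PySem.Dict String Int) (items : List (String × String))
    (acc : Option (Int × String)) :
    items.foldl
      (fun best kv =>
        let val := PySem.Str.strip kv.2
        if val ≠ "" then
          match rank.get? (PySem.Str.lower kv.1) with
          | some r => pvMinstep best (r, val)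
          | none => best
        else best) acc
    = (items.filterMap (fun kv =>
        if PySem.Str.strip kv.2 ≠ "" then
          (rank.get? (PySem.Str.lower kv.1)).map (fun r => (r, PySem.Str.strip kv.2))
        else none)).foldl pvMinstep acc := by
  induction items generalizing acc with
  | nil => rfl
  | cons kv items ih =>
    rw [List.foldl_cons, List.filterMap_cons]
    by_cases hs : PySem.Str.strip kv.2 = ""
    · simp only [hs]
      rw [if_neg (by simp), if_neg (by simp)]
      exact ih acc
    · rw [if_pos (by simpa using hs), if_pos (by simpa using hs)]
      cases hr : rank.get? (PySem.Str.lower kv.1) with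
      | none => simpa using ih acc
      | some r => simpa using ih (pvMinstep acc (r, PySem.Str.strip kv.2))

theorem pvScan_eq (rank : PySem.Dict String Int) (items : List (String × String)) :
    pyB_scan rank items
    = (items.filterMap (fun kv =>
        if PySem.Str.strip kv.2 ≠ "" then
          (rank.get? (PySem.Str.lower kv.1)).map (fun r => (r, PySem.Str.strip kv.2))
        else none)).foldl pvMinstep none := by
  rw [← pvScan_fold rank items none]
  rfl

theorem pvMinfold_keep (L : List (Int × String)) (x : Int × String)
    (h : ∀ y ∈ L, ¬ y.1 < x.1) : L.foldl pvMinstep (some x) = some x := by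
  induction L with
  | nil => rfl
  | cons z L ih =>
    rw [List.foldl_cons, show pvMinstep (some x) z = some x by
      simp [pvMinstep, h z (by simp)]]
    exact ih (fun y hy => h y (by simp [hy]))

theorem pvMinfold_min (L : List (Int × String)) (x : Int × String) (acc : Option (Int × String))
    (hx : x ∈ L) (hmin : ∀ y ∈ L, x.1 < y.1 ∨ y = x)
    (hacc : acc = none ∨ ∃ b, acc = some b ∧ x.1 < b.1) :
    L.foldl pvMinstep acc = some x := by
  induction L generalizing acc with
  | nil => simp at hx
  | cons z L ih =>
    rw [List.foldl_cons]
    by_cases hz : z = x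
    · subst hz
      have hstep : pvMinstep acc z = some z := by
        rcases hacc with rfl | ⟨b, rfl, hb⟩
        · rfl
        · simp [pvMinstep, hb]
      rw [hstep]
      refine pvMinfold_keep L z (fun y hy => ?_)
      rcases hmin y (by simp [hy]) with h | rfl
      · omega
      · omega
    · have hxL : x ∈ L := by
        rcases List.mem_cons.mp hx with rfl | h
        · exact absurd rfl hz
        · exact h
      have hzgt : x.1 < z.1 := by
        rcases hmin z (by simp) with h | rfl
        · exact h
        · exact absurd rfl hz
      refine ih (pvMinstep acc z) hxL (fun y hy => hmin y (List.mem_cons_of_mem _ hy)) ?_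
      rcases hacc with rfl | ⟨b, rfl, hb⟩
      · exact Or.inr ⟨z, rfl, hzgt⟩
      · refine Or.inr ?_
        by_cases h2 : z.1 < b.1
        · exact ⟨z, by simp [pvMinstep, h2], hzgt⟩
        · exact ⟨b, by simp [pvMinstep, h2], hb⟩

theorem pvCrux (items : List (String × String))
    (hu : ∀ kv1 ∈ items, ∀ kv2 ∈ items,
      PySem.Str.lower kv1.1 = PySem.Str.lower kv2.1 → kv1 = kv2)
    (fields : List String) : ∀ (s0 : Int),
    fields.findSome? (fun w => pvG items (PySem.Str.lower w))
      = ((pvAnn fields s0 items).foldl pvMinstep none).map Prod.snd := by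
  induction fields with
  | nil =>
    intro s0
    have hann : pvAnn [] s0 items = [] := by
      unfold pvAnn pvRk
      simp [PySem.List.enumerate]
    simp [hann]
  | cons w rest ih =>
    intro s0
    rw [List.findSome?_cons]
    cases hg : pvG items (PySem.Str.lower w) with
    | some v =>
      unfold pvG at hg
      cases hf : items.find? (fun kv => PySem.Str.lower kv.1 == PySem.Str.lower w) with
      | none => rw [hf] at hg; simp at hg
      | some kv0 =>
        rw [hf] at hg
        by_cases hs : PySem.Str.strip kv0.2 = ""
        · simp [hs] at hg
        · have hv : v = PySem.Str.strip kv0.2 := by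
            simp only [Option.bind_some] at hg
            rw [if_pos (by simpa using hs)] at hg
            exact (Option.some_inj.mp hg).symm
          have hmem0 := List.mem_of_find?_eq_some hf
          have hl0 : PySem.Str.lower kv0.1 = PySem.Str.lower w := by
            simpa using List.find?_some hf
          have hxann : ((s0 : Int), PySem.Str.strip kv0.2) ∈ pvAnn (w :: rest) s0 items := by
            unfold pvAnn
            refine List.mem_filterMap.mpr ⟨kv0, hmem0, ?_⟩
            rw [if_pos (by simpa using hs), hl0, pvRk_cons, if_pos rfl]
            rfl
          have hminy : ∀ y ∈ pvAnn (w :: rest) s0 items,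
              ((s0 : Int), PySem.Str.strip kv0.2).1 < y.1 ∨ y = (s0, PySem.Str.strip kv0.2) := by
            intro y hy
            unfold pvAnn at hy
            obtain ⟨kv, hkv, hfy⟩ := List.mem_filterMap.mp hy
            by_cases hse : PySem.Str.strip kv.2 = ""
            · rw [if_neg (by simpa using hse)] at hfy; simp at hfy
            · rw [if_pos (by simpa using hse)] at hfy
              rw [pvRk_cons] at hfy
              by_cases hlw : PySem.Str.lower w = PySem.Str.lower kv.1
              · have hkk : kv = kv0 := hu kv hkv kv0 hmem0 (by rw [← hlw, hl0])
                subst hkk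
                rw [if_pos hlw] at hfy
                right
                simpa using hfy.symm
              · rw [if_neg hlw] at hfy
                cases hr : pvRk rest (s0+1) (PySem.Str.lower kv.1) with
                | none => rw [hr] at hfy; simp at hfy
                | some r =>
                  rw [hr] at hfy
                  have hge := pvRk_ge rest (s0+1) _ r hr
                  left
                  have hy1 : y.1 = r := by
                    have := Option.some_inj.mp hfy
                    rw [← this]
                  simp only [hy1]
                  omega
          rw [pvMinfold_min (pvAnn (w :: rest) s0 items) (s0, PySem.Str.strip kv0.2) none
            hxann hminy (Or.inl rfl)]
          simp [hv]
    | none =>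
      have hann : pvAnn (w :: rest) s0 items = pvAnn rest (s0+1) items := by
        unfold pvAnn
        refine List.filterMap_congr (fun kv hkv => ?_)
        by_cases hse : PySem.Str.strip kv.2 = ""
        · rw [if_neg (by simpa using hse), if_neg (by simpa using hse)]
        · rw [if_pos (by simpa using hse), if_pos (by simpa using hse), pvRk_cons, if_neg ?_]
          intro hlw
          unfold pvG at hg
          cases hf : items.find? (fun kv => PySem.Str.lower kv.1 == PySem.Str.lower w) with
          | none =>
            have := List.find?_eq_none.mp hf kv hkv
            simp [← hlw] at this
          | some kv' =>
            rw [hf] at hg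
            have hl' : PySem.Str.lower kv'.1 = PySem.Str.lower w := by
              simpa using List.find?_some hf
            have hkk : kv' = kv := hu kv' (List.mem_of_find?_eq_some hf) kv hkv
              (by rw [hl', hlw])
            subst hkk
            simp only [Option.bind_some] at hg
            rw [if_pos (by simpa using hse)] at hg
            simp at hg
      rw [hann, ih (s0+1)]

theorem pvKeys_ofList (d : List (String × String)) :
    (PySem.Dict.ofList d).keys = PySem.Set.ofList (d.map (·.1)) := by
  rw [show PySem.Dict.ofList d = d.foldl (fun m p => m.insert p.1 p.2) PySem.Dict.empty from rfl]
  rw [PySem.Dict.keys_foldl_insert_key]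
  simp [PySem.Set.update_nil_left, PySem.Dict.keys_empty]

theorem pvEq_of_fst (L : List (String × String)) (h : (L.map Prod.fst).Nodup)
    (kv1 kv2 : String × String) (h1 : kv1 ∈ L) (h2 : kv2 ∈ L) (he : kv1.1 = kv2.1) :
    kv1 = kv2 := by
  induction L with
  | nil => simp at h1
  | cons z L ih =>
    simp only [List.map_cons, List.nodup_cons] at h
    rcases List.mem_cons.mp h1 with rfl | h1' <;> rcases List.mem_cons.mp h2 with rfl | h2'
    · rfl
    · exact absurd (he ▸ List.mem_map_of_mem h2') h.1
    · exact absurd (he ▸ List.mem_map_of_mem h1') h.1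
    · exact ih h.2 h1' h2'

-- ===== VERDICT =====
theorem best_text_field_py_spec : Claim_equal_best_text_field_py := by
  intro d fp _ hpre
  obtain ⟨hfp, hpair⟩ := hpre
  unfold Spec_best_text_field_py best_text_field_py best_text_field_py_alt
  have hnd : (PySem.Dict.ofList d).keys.Nodup := PySem.Dict.nodup_keys_ofList d
  have hksub : ∀ k ∈ (PySem.Dict.ofList d).keys, k ∈ d.map (·.1) := by
    intro k hk
    rw [pvKeys_ofList] at hk
    exact (PySem.Set.mem_ofList _ _).mp hk
  have hinj : ∀ a ∈ (PySem.Dict.ofList d).keys, ∀ b ∈ (PySem.Dict.ofList d).keys,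
      PySem.Str.lower a = PySem.Str.lower b → a = b := by
    intro a ha b hb hab
    by_cases h : a = b
    · exact h
    · exact hpair.forall (fun x y hxy h2 => (hxy h2.symm).symm) (hksub a ha) (hksub b hb) h hab
  have hlu : ((PySem.Dict.ofList d).keys.map PySem.Str.lower).Nodup := List.Nodup.map_on hinj hnd
  have hu : ∀ kv1 ∈ (PySem.Dict.ofList d).items, ∀ kv2 ∈ (PySem.Dict.ofList d).items,
      PySem.Str.lower kv1.1 = PySem.Str.lower kv2.1 → kv1 = kv2 := by
    intro kv1 h1 kv2 h2 hl
    have hk : kv1.1 = kv2.1 :=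
      hinj _ (List.mem_map_of_mem h1) _ (List.mem_map_of_mem h2) hl
    exact pvEq_of_fst _ hnd kv1 kv2 h1 h2 hk
  have hfields : ∀ w ∈ fp.getD [] ++ ["text", "ref", "transcript", "sentence", "content", "value", "utterance"],
      PySem.Str.lower w ≠ "" := by
    intro w hw hlw
    have hwe : w = "" := pvLower_eq_empty w hlw
    subst hwe
    rcases List.mem_append.mp hw with h | h
    · exact hfp h
    · simp at h
  have hcong : ∀ (fs : List String), (∀ w ∈ fs, PySem.Str.lower w ≠ "") →
      List.findSome? (pvStepA (PySem.Dict.ofList d) (pyA_lowerMap (PySem.Dict.ofList d).keys)) fs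
      = List.findSome? (fun w => pvG (PySem.Dict.ofList d).items (PySem.Str.lower w)) fs := by
    intro fs hfs
    induction fs with
    | nil => rfl
    | cons w fs ih =>
      rw [List.findSome?_cons, List.findSome?_cons,
        pvStepA_eq_g _ hnd hlu w (hfs w (by simp)), ih (fun w' hw' => hfs w' (by simp [hw']))]
  have hscan : pyB_scan (pyB_rank (fp.getD [] ++ ["text", "ref", "transcript", "sentence", "content", "value", "utterance"])) (PySem.Dict.ofList d).items
      = (pvAnn (fp.getD [] ++ ["text", "ref", "transcript", "sentence", "content", "value", "utterance"]) 0 (PySem.Dict.ofList d).items).foldl pvMinstep none := by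
    rw [pvScan_eq]
    congr 1
    unfold pvAnn
    refine List.filterMap_congr (fun kv _ => ?_)
    rw [pyB_rank_get]
  have hAB : pyA_loop (PySem.Dict.ofList d) (pyA_lowerMap (PySem.Dict.ofList d).keys)
        (fp.getD [] ++ ["text", "ref", "transcript", "sentence", "content", "value", "utterance"])
      = (pyB_scan (pyB_rank (fp.getD [] ++ ["text", "ref", "transcript", "sentence", "content", "value", "utterance"])) (PySem.Dict.ofList d).items).map Prod.snd := by
    rw [pvLoopA_eq_findSome?, hcong _ hfields, pvCrux _ hu _ 0, hscan]
  simp only []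
  rw [hAB]
  cases pyB_scan (pyB_rank (fp.getD [] ++ ["text", "ref", "transcript", "sentence", "content", "value", "utterance"])) (PySem.Dict.ofList d).items with
  | none => rfl
  | some b => rfl
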